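-- pv_equiv track=rewrite | github.com/MeadowNova/sea-e-engine | src/modules/openai_seo_optimizer.py | _extract_design_context
-- ===== SOURCE A (Python) =====
-- def _extract_design_context(design_slug: str) -> str:
--     """Extract rich context from descriptive design slug for better SEO generation."""
--     # Handle both underscore and space separators
--     clean_slug = design_slug.replace('_', ' ').replace('-', ' ').lower()
--     words = clean_slug.split()
--
--     # Expanded categories for better detection
--     subjects = [
--         'cat', 'dog', 'bird', 'flower', 'tree', 'coffee', 'book', 'barista',
--         'kitten', 'feline', 'pet', 'animal', 'plant', 'nature', 'cafe'
--     ]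
--
--     styles = [
--         'boho', 'vintage', 'modern', 'abstract', 'minimalist', 'renaissance',
--         'cubist', 'geometric', 'japanese', 'floral', 'artistic', 'contemporary',
--         'retro', 'classic', 'bohemian', 'eclectic'
--     ]
--
--     themes = [
--         'floral', 'geometric', 'nature', 'cosmic', 'literary', 'botanical',
--         'shower', 'bathroom', 'kitchen', 'home', 'lifestyle', 'cute', 'funny',
--         'lover', 'enthusiast', 'zen', 'peaceful', 'cozy', 'warm'
--     ]
--
--     colors = [
--         'black', 'white', 'blue', 'red', 'green', 'yellow', 'pink', 'purple',
--         'orange', 'brown', 'gray', 'grey', 'gold', 'silver', 'rainbow'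
--     ]
--
--     # Detect elements
--     detected_subjects = [word for word in words if word in subjects]
--     detected_styles = [word for word in words if word in styles]
--     detected_themes = [word for word in words if word in themes]
--     detected_colors = [word for word in words if word in colors]
--
--     # Build rich context description
--     context_parts = []
--
--     if detected_subjects:
--         context_parts.append(f"Subject: {', '.join(detected_subjects)}")
--
--     if detected_styles:
--         context_parts.append(f"Style: {', '.join(detected_styles)}")
--
--     if detected_themes:
--         context_parts.append(f"Theme: {', '.join(detected_themes)}")
--
--     if detected_colors:
--         context_parts.append(f"Colors: {', '.join(detected_colors)}")
--
--     # Add the full descriptive slug for additional context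
--     context_parts.append(f"Full description: {clean_slug}")
--
--     # Target audience inference
--     if any(word in clean_slug for word in ['cat', 'kitten', 'feline']):
--         context_parts.append("Target: Cat lovers, pet owners")
--     if any(word in clean_slug for word in ['coffee', 'barista', 'cafe']):
--         context_parts.append("Target: Coffee enthusiasts, cafe lovers")
--     if any(word in clean_slug for word in ['japanese', 'zen', 'floral']):
--         context_parts.append("Target: Art lovers, home decorators")
--
--     return '; '.join(context_parts)
-- ===== SOURCE B (Python) =====
-- SUBJECTS = [
--     'cat', 'dog', 'bird', 'flower', 'tree', 'coffee', 'book', 'barista',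
--     'kitten', 'feline', 'pet', 'animal', 'plant', 'nature', 'cafe'
-- ]
-- STYLES = [
--     'boho', 'vintage', 'modern', 'abstract', 'minimalist', 'renaissance',
--     'cubist', 'geometric', 'japanese', 'floral', 'artistic', 'contemporary',
--     'retro', 'classic', 'bohemian', 'eclectic'
-- ]
-- THEMES = [
--     'floral', 'geometric', 'nature', 'cosmic', 'literary', 'botanical',
--     'shower', 'bathroom', 'kitchen', 'home', 'lifestyle', 'cute', 'funny',
--     'lover', 'enthusiast', 'zen', 'peaceful', 'cozy', 'warm'
-- ]
-- COLORS = [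
--     'black', 'white', 'blue', 'red', 'green', 'yellow', 'pink', 'purple',
--     'orange', 'brown', 'gray', 'grey', 'gold', 'silver', 'rainbow'
-- ]
--
-- # word -> list of category indices (a word can belong to several categories)
-- _INDEX = {}
-- for _cat, _members in enumerate((SUBJECTS, STYLES, THEMES, COLORS)):
--     for _w in _members:
--         _INDEX[_w] = _INDEX.get(_w, []) + [_cat]
--
-- _LABELS = ("Subject: ", "Style: ", "Theme: ", "Colors: ")
--
-- _AUDIENCES = (
--     (('cat', 'kitten', 'feline'), "Target: Cat lovers, pet owners"),
--     (('coffee', 'barista', 'cafe'), "Target: Coffee enthusiasts, cafe lovers"),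
--     (('japanese', 'zen', 'floral'), "Target: Art lovers, home decorators"),
-- )
--
--
-- def _extract_design_context(design_slug: str) -> str:
--     clean_slug = design_slug.replace('_', ' ').replace('-', ' ').lower()
--     words = clean_slug.split()
--
--     # single pass over the words, routing each word into every matching category
--     buckets = ([], [], [], [])
--     for word in words:
--         for cat in _INDEX.get(word, ()):
--             buckets[cat].append(word)
--
--     parts = []
--     for label, bucket in zip(_LABELS, buckets):
--         if bucket:
--             parts.append(label + ', '.join(bucket))
--     parts.append(f"Full description: {clean_slug}")
--     for keys, msg in _AUDIENCES:
--         if any(k in clean_slug for k in keys):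
--             parts.append(msg)
--     return '; '.join(parts)
-- ===== Notes on version B (the rewrite author's own statement) =====
-- stated objective: alternative
-- what changed: Replaces the four separate filtering passes (one list comprehension per category, each testing membership in a category list) by a prebuilt word-to-categories index dict and ONE bucket-routing pass over the words; the parts and target-audience lines are then assembled by data-driven loops over label/audience tables instead of an explicit if-chain.
import Mathlib
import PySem

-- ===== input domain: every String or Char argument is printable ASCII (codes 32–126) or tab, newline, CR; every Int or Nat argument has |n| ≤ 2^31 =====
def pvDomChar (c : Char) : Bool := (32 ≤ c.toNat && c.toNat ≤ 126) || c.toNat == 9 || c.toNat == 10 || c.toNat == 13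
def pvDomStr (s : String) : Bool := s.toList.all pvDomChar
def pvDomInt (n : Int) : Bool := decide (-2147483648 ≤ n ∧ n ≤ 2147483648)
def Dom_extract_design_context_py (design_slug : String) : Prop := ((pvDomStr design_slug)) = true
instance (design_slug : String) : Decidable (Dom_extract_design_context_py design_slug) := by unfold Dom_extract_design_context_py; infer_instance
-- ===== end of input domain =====

-- B replaces A's four filtering passes by a prebuilt word→categories index dict and one
-- bucket-routing pass over the words (an alternative algorithm, same return value).

-- shared constant data (the four category word lists of the Python module)
def subjectsL : List String :=
  ["cat", "dog", "bird", "flower", "tree", "coffee", "book", "barista",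
   "kitten", "feline", "pet", "animal", "plant", "nature", "cafe"]
def stylesL : List String :=
  ["boho", "vintage", "modern", "abstract", "minimalist", "renaissance",
   "cubist", "geometric", "japanese", "floral", "artistic", "contemporary",
   "retro", "classic", "bohemian", "eclectic"]
def themesL : List String :=
  ["floral", "geometric", "nature", "cosmic", "literary", "botanical",
   "shower", "bathroom", "kitchen", "home", "lifestyle", "cute", "funny",
   "lover", "enthusiast", "zen", "peaceful", "cozy", "warm"]
def colorsL : List String :=
  ["black", "white", "blue", "red", "green", "yellow", "pink", "purple",
   "orange", "brown", "gray", "grey", "gold", "silver", "rainbow"]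

-- ===== PORT A =====
def extract_design_context_py (design_slug : String) : String :=
  let clean_slug := PySem.Str.lower (PySem.Str.replace (PySem.Str.replace design_slug "_" " ") "-" " ")
  let words := PySem.Str.split₀ clean_slug
  let detected_subjects := words.filter (fun w => subjectsL.contains w)
  let detected_styles := words.filter (fun w => stylesL.contains w)
  let detected_themes := words.filter (fun w => themesL.contains w)
  let detected_colors := words.filter (fun w => colorsL.contains w)
  let context_parts : List String := []
  let context_parts := if detected_subjects.isEmpty then context_parts
    else context_parts ++ ["Subject: " ++ PySem.Str.join ", " detected_subjects]
  let context_parts := if detected_styles.isEmpty then context_parts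
    else context_parts ++ ["Style: " ++ PySem.Str.join ", " detected_styles]
  let context_parts := if detected_themes.isEmpty then context_parts
    else context_parts ++ ["Theme: " ++ PySem.Str.join ", " detected_themes]
  let context_parts := if detected_colors.isEmpty then context_parts
    else context_parts ++ ["Colors: " ++ PySem.Str.join ", " detected_colors]
  let context_parts := context_parts ++ ["Full description: " ++ clean_slug]
  let context_parts := if (["cat", "kitten", "feline"].any (fun w => PySem.Str.isIn w clean_slug))
    then context_parts ++ ["Target: Cat lovers, pet owners"] else context_parts
  let context_parts := if (["coffee", "barista", "cafe"].any (fun w => PySem.Str.isIn w clean_slug))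
    then context_parts ++ ["Target: Coffee enthusiasts, cafe lovers"] else context_parts
  let context_parts := if (["japanese", "zen", "floral"].any (fun w => PySem.Str.isIn w clean_slug))
    then context_parts ++ ["Target: Art lovers, home decorators"] else context_parts
  PySem.Str.join "; " context_parts

-- ===== PORT B =====
-- B-side helpers: the word -> category-indices index dict, built once from the four lists
def pvCategories : List (Nat × List String) :=
  [(0, subjectsL), (1, stylesL), (2, themesL), (3, colorsL)]

def pvIndex : PySem.Dict String (List Nat) :=
  pvCategories.foldl
    (fun d p => p.2.foldl (fun d w => d.insert w (d.getD w [] ++ [p.1])) d)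
    PySem.Dict.empty

abbrev PvBuckets := List String × List String × List String × List String

def pvPush (b : PvBuckets) (c : Nat) (w : String) : PvBuckets :=
  if c = 0 then (b.1 ++ [w], b.2.1, b.2.2.1, b.2.2.2)
  else if c = 1 then (b.1, b.2.1 ++ [w], b.2.2.1, b.2.2.2)
  else if c = 2 then (b.1, b.2.1, b.2.2.1 ++ [w], b.2.2.2)
  else (b.1, b.2.1, b.2.2.1, b.2.2.2 ++ [w])

def pvAudiences : List (List String × String) :=
  [(["cat", "kitten", "feline"], "Target: Cat lovers, pet owners"),
   (["coffee", "barista", "cafe"], "Target: Coffee enthusiasts, cafe lovers"),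
   (["japanese", "zen", "floral"], "Target: Art lovers, home decorators")]

def extract_design_context_py_alt (design_slug : String) : String :=
  let clean_slug := PySem.Str.lower (PySem.Str.replace (PySem.Str.replace design_slug "_" " ") "-" " ")
  let words := PySem.Str.split₀ clean_slug
  let bk : PvBuckets := words.foldl
    (fun b w => (pvIndex.getD w []).foldl (fun b c => pvPush b c w) b) ([], [], [], [])
  let labeled : List (String × List String) :=
    [("Subject: ", bk.1), ("Style: ", bk.2.1), ("Theme: ", bk.2.2.1), ("Colors: ", bk.2.2.2)]
  let parts := labeled.foldl
    (fun acc p => if p.2.isEmpty then acc else acc ++ [p.1 ++ PySem.Str.join ", " p.2]) []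
  let parts := parts ++ ["Full description: " ++ clean_slug]
  let parts := pvAudiences.foldl
    (fun acc p => if p.1.any (fun k => PySem.Str.isIn k clean_slug) then acc ++ [p.2] else acc) parts
  PySem.Str.join "; " parts

-- ===== PRECONDITION & SPEC =====
def Spec_extract_design_context_py (design_slug : String) (out : String) : Prop := out = extract_design_context_py_alt design_slug
instance (design_slug : String) (out : String) : Decidable (Spec_extract_design_context_py design_slug out) := by unfold Spec_extract_design_context_py; infer_instance

-- ===== CLAIM (what is proved, stated in full; the proofs are below) =====
def Claim_equal_extract_design_context_py : Prop := ∀ (design_slug : String), Dom_extract_design_context_py design_slug → Spec_extract_design_context_py design_slug (extract_design_context_py design_slug)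

-- ===== LEMMAS AND PROOFS =====

-- one index-building pass over a list `l` with tag `i` appends `i` once per occurrence of the key
theorem pv_pass_getD (l : List String) (i : Nat) (d : PySem.Dict String (List Nat)) (x : String) :
    (l.foldl (fun d w => d.insert w (d.getD w [] ++ [i])) d).getD x []
      = d.getD x [] ++ List.replicate (l.count x) i := by
  induction l generalizing d with
  | nil => simp
  | cons w t ih =>
    simp only [List.foldl_cons, ih, List.count_cons]
    by_cases hx : x = w
    · subst hx
      simp [List.append_assoc]
      rw [← List.replicate_succ, List.replicate_succ']
    · have : (w == x) = false := by simp [Ne.symm hx]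
      simp [PySem.Dict.getD_insert, hx, this]

theorem pv_index_getD (x : String) :
    pvIndex.getD x []
      = (if subjectsL.contains x then [0] else [])
        ++ (if stylesL.contains x then [1] else [])
        ++ (if themesL.contains x then [2] else [])
        ++ (if colorsL.contains x then [3] else []) := by
  have hrep : ∀ (l : List String) (i : Nat), l.Nodup →
      List.replicate (l.count x) i = (if l.contains x then [i] else []) := by
    intro l i hnd
    by_cases hm : x ∈ l
    · simp [List.count_eq_one_of_mem hnd hm, hm]
    · simp [List.count_eq_zero_of_not_mem hm, hm]
  have h1 : subjectsL.Nodup := by decide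
  have h2 : stylesL.Nodup := by decide
  have h3 : themesL.Nodup := by decide
  have h4 : colorsL.Nodup := by decide
  show (PySem.Dict.getD pvIndex x []) = _
  rw [show pvIndex
      = colorsL.foldl (fun d w => d.insert w (d.getD w [] ++ [3]))
        (themesL.foldl (fun d w => d.insert w (d.getD w [] ++ [2]))
          (stylesL.foldl (fun d w => d.insert w (d.getD w [] ++ [1]))
            (subjectsL.foldl (fun d w => d.insert w (d.getD w [] ++ [0]))
              PySem.Dict.empty)))
    from by simp [pvIndex, pvCategories]]
  rw [pv_pass_getD, pv_pass_getD, pv_pass_getD, pv_pass_getD,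
      hrep _ _ h1, hrep _ _ h2, hrep _ _ h3, hrep _ _ h4]
  simp [PySem.Dict.getD_empty, List.append_assoc]

-- the single bucket-routing pass computes exactly A's four filters (appended to the start state)
theorem pv_buckets_eq (ws : List String) (b : PvBuckets) :
    ws.foldl (fun b w => (pvIndex.getD w []).foldl (fun b c => pvPush b c w) b) b
      = (b.1 ++ ws.filter (fun w => subjectsL.contains w),
         b.2.1 ++ ws.filter (fun w => stylesL.contains w),
         b.2.2.1 ++ ws.filter (fun w => themesL.contains w),
         b.2.2.2 ++ ws.filter (fun w => colorsL.contains w)) := by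
  induction ws generalizing b with
  | nil => simp
  | cons w t ih =>
    simp only [List.foldl_cons, ih, pv_index_getD w, List.filter_cons]
    by_cases c1 : w ∈ subjectsL <;> by_cases c2 : w ∈ stylesL <;>
      by_cases c3 : w ∈ themesL <;> by_cases c4 : w ∈ colorsL <;>
      simp [c1, c2, c3, c4, pvPush, List.foldl, List.append_assoc]

-- ===== VERDICT (by name: the statement is the Claim_ definition above) =====
theorem extract_design_context_py_spec : Claim_equal_extract_design_context_py := by
  intro design_slug _
  show extract_design_context_py design_slug = extract_design_context_py_alt design_slug
  simp only [extract_design_context_py, extract_design_context_py_alt]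
  rw [pv_buckets_eq]
  generalize PySem.Str.lower (PySem.Str.replace (PySem.Str.replace design_slug "_" " ") "-" " ") = cs
  generalize PySem.Str.split₀ cs = ws
  generalize List.filter (fun w => subjectsL.contains w) ws = s1
  generalize List.filter (fun w => stylesL.contains w) ws = s2
  generalize List.filter (fun w => themesL.contains w) ws = s3
  generalize List.filter (fun w => colorsL.contains w) ws = s4
  simp only [List.foldl_cons, List.foldl_nil, pvAudiences, List.nil_append]
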